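-- pv_equiv track=rewrite | github.com/garymooney/qmuvi | qmuvi/musical_processing.py | note_map_c_major
-- ===== SOURCE A (Python) =====
-- def note_map_c_major(n: int) -> int:
--     """Map `n` to a note in the C major scale. It starts at middle C.
--
--     Parameters
--     ----------
--         n
--             The integer to be mapped to a note.
--
--     Returns
--     -------
--         The note mapped to from `n`.
--     """
--     C_MAJ = [
--         0,
--         2,
--         4,
--         5,
--         7,
--         9,
--         11,
--         12,
--         14,
--         16,
--         17,
--         19,
--         21,
--         23,
--         24,
--         26,
--         28,
--         29,
--         31,
--         33,
--         35,
--         36,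
--         38,
--         40,
--         41,
--         43,
--         45,
--         47,
--         48,
--         50,
--         52,
--         53,
--         55,
--         57,
--         59,
--         60,
--         62,
--         64,
--         65,
--         67,
--         69,
--         71,
--         72,
--         74,
--         76,
--         77,
--         79,
--         81,
--         83,
--         84,
--         86,
--         88,
--         89,
--         91,
--         93,
--         95,
--         96,
--         98,
--         100,
--         101,
--         103,
--         105,
--         107,
--         108,
--         110,
--         112,
--         113,
--         115,
--         117,
--         119,
--         120,
--         122,
--         124,
--         125,
--         127,
--     ]
--     CURR_MODE = C_MAJ
--     note = 60 + n
--     # Shifting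
--     if CURR_MODE and note < CURR_MODE[0]:
--         note = CURR_MODE[0]
--     else:
--         while CURR_MODE and note not in CURR_MODE:
--             note -= 1
--     return note
-- ===== SOURCE B (Python) =====
-- # O(1) closed form: clamp to [0,127], then octave arithmetic + a 12-entry table
-- # (largest C-major offset <= the semitone position within the octave).
-- WHITE = [0, 0, 2, 2, 4, 5, 5, 7, 7, 9, 9, 11]
--
-- def note_map_c_major(n: int) -> int:
--     note = max(0, min(60 + n, 127))
--     octave, pos = divmod(note, 12)
--     return octave * 12 + WHITE[pos]
-- ===== Notes on version B (the rewrite author's own statement) =====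
-- stated objective: faster
-- what changed: Replaces the decrement-until-member linear search over the 75-element C_MAJ list with a clamp to [0,127] plus divmod octave arithmetic and a fixed 12-entry within-octave table, making it O(1).
import Mathlib
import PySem

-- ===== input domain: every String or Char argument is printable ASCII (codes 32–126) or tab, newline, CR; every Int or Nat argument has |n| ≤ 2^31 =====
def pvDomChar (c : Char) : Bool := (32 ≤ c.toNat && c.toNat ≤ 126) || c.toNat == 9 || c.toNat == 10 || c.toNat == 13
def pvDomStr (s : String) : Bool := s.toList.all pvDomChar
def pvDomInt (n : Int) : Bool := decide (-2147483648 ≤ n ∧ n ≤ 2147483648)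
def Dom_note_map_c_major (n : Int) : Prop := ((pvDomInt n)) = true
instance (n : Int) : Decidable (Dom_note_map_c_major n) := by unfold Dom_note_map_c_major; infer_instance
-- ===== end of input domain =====

-- B replaces A's decrement-until-member search with clamp + octave arithmetic + a 12-entry table (faster, O(1)).

-- ===== PORT A =====
def pvCMaj : List Int :=
  [0, 2, 4, 5, 7, 9, 11, 12, 14, 16, 17, 19, 21, 23, 24, 26, 28, 29, 31, 33, 35,
   36, 38, 40, 41, 43, 45, 47, 48, 50, 52, 53, 55, 57, 59, 60, 62, 64, 65, 67,
   69, 71, 72, 74, 76, 77, 79, 81, 83, 84, 86, 88, 89, 91, 93, 95, 96, 98, 100,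
   101, 103, 105, 107, 108, 110, 112, 113, 115, 117, 119, 120, 122, 124, 125, 127]

-- the `while note not in CURR_MODE: note -= 1` loop; fuel only makes it total
-- (note.toNat + 1 steps always reach 0 ∈ C_MAJ, so fuel never runs out on A's reachable states)
def pvLoopA : Nat → Int → Int
  | 0, note => note
  | fuel + 1, note => if note ∈ pvCMaj then note else pvLoopA fuel (note - 1)

def note_map_c_major (n : Int) : Int :=
  let note := 60 + n
  if note < 0 then 0       -- `if CURR_MODE and note < CURR_MODE[0]` (CURR_MODE[0] = 0)
  else pvLoopA (note.toNat + 1) note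

-- ===== PORT B =====
def pvWhite : List Int := [0, 0, 2, 2, 4, 5, 5, 7, 7, 9, 9, 11]

def note_map_c_major_alt (n : Int) : Int :=
  let note := max 0 (min (60 + n) 127)
  let octave := PySem.Int.floordiv note 12
  let pos := PySem.Int.mod note 12
  -- pos ∈ [0,11] always, so the lookup hits; the getD 0 default is unreachable
  octave * 12 + ((PySem.List.pyGet? pvWhite pos).getD 0)

-- ===== PRECONDITION & SPEC =====
def Spec_note_map_c_major (n : Int) (out : Int) : Prop := out = note_map_c_major_alt n
instance (n : Int) (out : Int) : Decidable (Spec_note_map_c_major n out) := by unfold Spec_note_map_c_major; infer_instance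

-- ===== CLAIM (what is proved, stated in full; the proofs are below) =====
def Claim_equal_note_map_c_major : Prop := ∀ (n : Int), Dom_note_map_c_major n → Spec_note_map_c_major n (note_map_c_major n)

-- ===== LEMMAS AND PROOFS =====

-- any member of C_MAJ is ≤ 127
theorem pv_cmaj_le : ∀ x ∈ pvCMaj, x ≤ 127 := by decide

-- above 127 the loop walks down to 127
theorem pv_loop_high (m : Nat) : pvLoopA (128 + m) (127 + (m : Int)) = 127 := by
  induction m with
  | zero => decide
  | succ k ih =>
      have hne : (127 + ((k : Int) + 1)) ∉ pvCMaj := by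
        intro h; have := pv_cmaj_le _ h; omega
      have : (128 : Nat) + (k + 1) = (128 + k) + 1 := by omega
      rw [this]
      show (if (127 + ((k + 1 : Nat) : Int)) ∈ pvCMaj then _ else pvLoopA (128 + k) (127 + ((k + 1 : Nat) : Int) - 1)) = 127
      rw [if_neg (by push_cast; exact hne)]
      have h2 : (127 + ((k + 1 : Nat) : Int) - 1) = 127 + (k : Int) := by push_cast; ring
      rw [h2]; exact ih

-- in the clamped range the two computations agree (finite check)
theorem pv_small : ∀ k : Nat, k < 128 →
    pvLoopA (k + 1) (k : Int) = note_map_c_major_alt ((k : Int) - 60) := by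
  decide

theorem pv_alt_low (n : Int) (h : 60 + n < 0) : note_map_c_major_alt n = 0 := by
  have h1 : max 0 (min (60 + n) 127) = 0 := by omega
  simp only [note_map_c_major_alt, h1]
  decide

theorem pv_alt_high (n : Int) (h : 127 ≤ 60 + n) : note_map_c_major_alt n = 127 := by
  have h1 : max 0 (min (60 + n) 127) = 127 := by omega
  simp only [note_map_c_major_alt, h1]
  decide

-- ===== VERDICT (by name: the statement is the Claim_ definition above) =====
theorem note_map_c_major_spec : Claim_equal_note_map_c_major := by
  intro n _
  show note_map_c_major n = note_map_c_major_alt n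
  unfold note_map_c_major
  by_cases hlo : 60 + n < 0
  · rw [if_pos hlo, pv_alt_low n hlo]
  · rw [if_neg hlo]
    push Not at hlo
    by_cases hhi : 60 + n < 128
    · have hk : ∃ k : Nat, (k : Int) = 60 + n ∧ k < 128 := by
        refine ⟨(60 + n).toNat, ?_, ?_⟩ <;> omega
      obtain ⟨k, hk1, hk2⟩ := hk
      have ht : (60 + n).toNat = k := by omega
      rw [ht, ← hk1]
      have := pv_small k hk2
      have harg : (k : Int) - 60 = n := by omega
      rw [harg] at this
      exact this
    · have hm : ∃ m : Nat, 60 + n = 127 + (m : Int) := ⟨(60 + n - 127).toNat, by omega⟩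
      obtain ⟨m, hm⟩ := hm
      have ht : (60 + n).toNat + 1 = 128 + m := by omega
      rw [ht, hm, pv_loop_high m, pv_alt_high n (by omega)]
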